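-- pv_equiv track=rewrite | github.com/masahiro-999/atcoder-workspace | abc146/C/main.py | solve
-- ===== SOURCE A (Python) =====
-- def solve(A: int, B: int, X: int):
--
--     if A+B > X:
--         return 0
--
--     k = 1
--     while True:
--         if 10**(k-1)*A+k*B <= X:
--             k += 1
--         else:
--             k -= 1
--             break
--     X -= B*k
--     max_x = X//A
--     x = min([10**k-1,max_x, 1000000000])
--     return (x)
-- ===== SOURCE B (Python) =====
-- def digits(n):
--     d = 0
--     while n > 0:
--         n //= 10
--         d += 1
--     return d
--
--
-- def solve(A: int, B: int, X: int):
--     if A + B > X: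
--         return 0
--     lo, hi, ans = 1, 10**9, 1
--     while lo <= hi:
--         mid = (lo + hi) // 2
--         if A * mid + B * digits(mid) <= X:
--             ans = mid
--             lo = mid + 1
--         else:
--             hi = mid - 1
--     return ans
-- ===== Notes on version B (the rewrite author's own statement) =====
-- stated objective: alternative
-- what changed: Replaces A's incremental digit-count threshold loop plus the closed form min(10^k-1, X//A, 10^9) with a binary search over [1, 10^9] for the largest N with A*N + B*digits(N) <= X (digits computed by repeated division).
-- outside the precondition, e.g. on solve(3, -17, -2): A returns 10, B returns 5; on solve(1, -10, -5): A returns 15, B returns 15; on solve(0, 5, 100): A raises ZeroDivisionError, B returns 1000000000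
import Mathlib
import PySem

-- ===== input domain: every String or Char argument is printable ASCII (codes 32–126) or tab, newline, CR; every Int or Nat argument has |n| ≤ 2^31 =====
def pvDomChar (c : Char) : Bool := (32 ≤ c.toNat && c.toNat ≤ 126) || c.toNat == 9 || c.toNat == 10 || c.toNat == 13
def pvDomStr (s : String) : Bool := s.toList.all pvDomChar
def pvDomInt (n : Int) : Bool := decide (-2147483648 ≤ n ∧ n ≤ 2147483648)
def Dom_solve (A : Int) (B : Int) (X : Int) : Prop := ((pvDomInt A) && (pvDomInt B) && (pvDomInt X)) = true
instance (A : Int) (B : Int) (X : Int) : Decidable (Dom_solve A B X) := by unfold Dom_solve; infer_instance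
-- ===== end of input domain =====

-- B replaces A's digit-count threshold loop + closed form by a binary search for the
-- largest N in [1, 10^9] with A*N + B*digits(N) ≤ X (objective: alternative algorithm).

-- ===== PORT A =====
-- A's 'while True' digit loop; fuel 100 is a totality guard only: inside Pre_ the loop
-- always breaks before k = 12 (10^(k-1)*A alone then exceeds X ≤ 2^31).
-- k ≥ 1 throughout every execution, so '10 ^ (k-1).toNat' is exactly Python's 10**(k-1).
def solveLoopA (A B X : Int) : Nat → Int → Int
  | 0, k => k - 1
  | f + 1, k =>
    if 10 ^ ((k - 1).toNat) * A + k * B ≤ X then solveLoopA A B X f (k + 1)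
    else k - 1

def solve (A : Int) (B : Int) (X : Int) : Int :=
  if A + B > X then 0
  else
    let k := solveLoopA A B X 100 1
    let X' := X - B * k                                    -- X -= B*k
    let max_x := PySem.Int.floordiv X' A                   -- X // A
    min (10 ^ k.toNat - 1) (min max_x 1000000000)          -- min([10**k-1, max_x, 10**9])

-- ===== PORT B =====
-- Source B's digits helper: while n > 0: n //= 10; d += 1  (loop → structural recursion;
-- fuel 64 is a totality guard only: the loop runs digits(n) < 64 times for every n < 10^64,
-- and solve_alt only calls it on mid ≤ 10^9)
def digitsBAux : Nat → Int → Int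
  | 0, _ => 0
  | f + 1, n => if 0 < n then digitsBAux f (PySem.Int.floordiv n 10) + 1 else 0

def digitsB (n : Int) : Int := digitsBAux 64 n

-- Source B's binary-search loop; fuel 64 is a totality guard only (the interval halves each
-- step, so 64 iterations always cover the initial interval of size 10^9).
def solveLoopB (A B X : Int) : Nat → Int → Int → Int → Int
  | 0, _, _, ans => ans
  | f + 1, lo, hi, ans =>
    if lo ≤ hi then
      let mid := PySem.Int.floordiv (lo + hi) 2
      if A * mid + B * digitsB mid ≤ X then solveLoopB A B X f (mid + 1) hi mid
      else solveLoopB A B X f lo (mid - 1) ans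
    else ans

def solve_alt (A : Int) (B : Int) (X : Int) : Int :=
  if A + B > X then 0
  else solveLoopB A B X 64 1 1000000000 1

-- ===== PRECONDITION & SPEC =====
-- Pre_ excludes only inputs with A + B ≤ X and (A ≤ 0 or B < 0): there A either diverges
-- (A ≤ 0 with the loop condition never failing, or A = 0 with B = 0) or raises
-- ZeroDivisionError (A = 0, B > 0), and for negative B the feasibility predicate
-- A*N + B*digits(N) ≤ X is non-monotone, so A's digit-threshold formula and any monotone
-- search return accidental, equally unspecified values (the problem assumes A, B ≥ 1).
def Pre_solve (A : Int) (B : Int) (X : Int) : Prop :=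
  X < A + B ∨ (1 ≤ A ∧ 0 ≤ B)
instance (A : Int) (B : Int) (X : Int) : Decidable (Pre_solve A B X) := by
  unfold Pre_solve; infer_instance

def pvWitness_solve : Int × Int × Int := (3, 2, 100)

def Spec_solve (A : Int) (B : Int) (X : Int) (out : Int) : Prop := out = solve_alt A B X
instance (A : Int) (B : Int) (X : Int) (out : Int) : Decidable (Spec_solve A B X out) := by
  unfold Spec_solve; infer_instance

-- ===== CLAIM (what is proved, stated in full; the proofs are below) =====
def Claim_equal_solve : Prop := ∀ (A : Int) (B : Int) (X : Int), Dom_solve A B X → Pre_solve A B X → Spec_solve A B X (solve A B X)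

-- ===== LEMMAS AND PROOFS =====

-- A's loop condition at digit count k
def CondA (A B X k : Int) : Prop := 10 ^ ((k - 1).toNat) * A + k * B ≤ X

lemma solveLoopA_stop {A B X : Int} (f : Nat) (k : Int) (h : ¬ CondA A B X k) :
    solveLoopA A B X f k = k - 1 := by
  cases f <;> simp [solveLoopA, CondA] at h ⊢ <;> omega

lemma condA_succ_of_fail {A B X : Int} (hA : 1 ≤ A) (hB : 0 ≤ B) (k : Int) (hk : 1 ≤ k)
    (h : ¬ CondA A B X k) : ¬ CondA A B X (k + 1) := by
  unfold CondA at *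
  intro hc
  apply h
  have he : (k + 1 - 1).toNat = (k - 1).toNat + 1 := by omega
  rw [he, pow_succ] at hc
  have hp : (0:Int) < 10 ^ ((k - 1).toNat) := by positivity
  nlinarith

lemma condA_fail_propagate {A B X : Int} (hA : 1 ≤ A) (hB : 0 ≤ B) (k : Int) (hk : 1 ≤ k)
    (h : ¬ CondA A B X k) : ∀ j : Int, k ≤ j → ¬ CondA A B X j := by
  have main : ∀ m : Nat, ¬ CondA A B X (k + m) := by
    intro m
    induction m with
    | zero => simpa using h
    | succ m ih =>
      have := condA_succ_of_fail hA hB (k + m) (by omega) ih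
      have he : k + (m + 1 : Nat) = k + (m : Int) + 1 := by push_cast; ring
      rwa [he]
  intro j hj
  have : j = k + ((j - k).toNat : Int) := by omega
  rw [this]; exact main _

lemma solveLoopA_spec {A B X : Int} :
    ∀ (f : Nat) (k : Int), 1 ≤ k → CondA A B X k →
      (∃ j : Int, k < j ∧ j ≤ k + f ∧ ¬ CondA A B X j) →
      CondA A B X (solveLoopA A B X f k) ∧
        ¬ CondA A B X (solveLoopA A B X f k + 1) ∧ k ≤ solveLoopA A B X f k := by
  intro f
  induction f with
  | zero =>
    intro k _ _ ⟨j, hj1, hj2, _⟩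
    omega
  | succ f ih =>
    intro k hk1 hCk hex
    have hstep : solveLoopA A B X (f + 1) k = solveLoopA A B X f (k + 1) := by
      unfold CondA at hCk
      simp only [solveLoopA, if_pos hCk]
    rw [hstep]
    by_cases hC1 : CondA A B X (k + 1)
    · obtain ⟨j, hj1, hj2, hj3⟩ := hex
      have hjne : j ≠ k + 1 := fun he => hj3 (he ▸ hC1)
      have := ih (k + 1) (by omega) hC1 ⟨j, by omega, by push_cast; push_cast at hj2; omega, hj3⟩
      exact ⟨this.1, this.2.1, by omega⟩
    · rw [solveLoopA_stop f (k + 1) hC1]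
      constructor
      · simpa using hCk
      · constructor
        · simpa using hC1
        · omega

-- proof-side digit-count function (well-founded recursion; linked to digitsW below)
def digitsW (n : Int) : Int :=
  if h : 0 < n then digitsW (n / 10) + 1 else 0
  termination_by n.toNat
  decreasing_by omega

-- digitsW facts -----------------------------------------------------------------

lemma digitsW_of_nonpos {n : Int} (h : ¬ 0 < n) : digitsW n = 0 := by
  rw [digitsW]; simp [h]

lemma digitsW_of_pos {n : Int} (h : 0 < n) : digitsW n = digitsW (n / 10) + 1 := by
  rw [digitsW]
  simp [h]

lemma digitsW_nonneg : ∀ n : Int, 0 ≤ digitsW n := by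
  intro n
  by_cases h : 0 < n
  · have : (n / 10).toNat < n.toNat := by omega
    have := digitsW_nonneg (n / 10)
    rw [digitsW_of_pos h]; omega
  · rw [digitsW_of_nonpos h]
  termination_by n => n.toNat

lemma digitsW_lt_pow : ∀ (e : Nat) (n : Int), 0 ≤ n → n < 10 ^ e → digitsW n ≤ e := by
  intro e
  induction e with
  | zero =>
    intro n h1 h2
    have : n = 0 := by simpa using (by omega : n = 0)
    rw [this, digitsW_of_nonpos (by omega)]
    simp
  | succ e ih =>
    intro n h1 h2
    by_cases h : 0 < n
    · rw [digitsW_of_pos h]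
      rw [pow_succ] at h2
      have h3 : n / 10 < 10 ^ e := by omega
      have := ih (n / 10) (by omega) h3
      push_cast
      omega
    · rw [digitsW_of_nonpos h]; positivity

lemma pow_le_digitsW : ∀ (e : Nat) (n : Int), 10 ^ e ≤ n → (e : Int) + 1 ≤ digitsW n := by
  intro e
  induction e with
  | zero =>
    intro n h
    simp only [pow_zero] at h
    rw [digitsW_of_pos (by omega)]
    have := digitsW_nonneg (n / 10)
    omega
  | succ e ih =>
    intro n h
    have hn : 0 < n := by
      have : (0:Int) < 10 ^ (e + 1) := by positivity
      omega
    rw [digitsW_of_pos hn]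
    rw [pow_succ] at h
    have : (10:Int) ^ e ≤ n / 10 := by omega
    have := ih (n / 10) this
    push_cast
    omega

lemma digitsW_mono : ∀ (n m : Int), 0 ≤ m → m ≤ n → digitsW m ≤ digitsW n := by
  intro n m h1 h2
  by_cases hm : 0 < m
  · have hn : 0 < n := by omega
    rw [digitsW_of_pos hm, digitsW_of_pos hn]
    have hlt : (n / 10).toNat < n.toNat := by omega
    have := digitsW_mono (n / 10) (m / 10) (by omega) (by omega)
    omega
  · rw [digitsW_of_nonpos hm]; exact digitsW_nonneg n
  termination_by n _ => n.toNat

-- n ≥ 10^(digitsW n - 1) for n ≥ 1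
lemma digitsW_lower {n : Int} (h : 1 ≤ n) : 10 ^ ((digitsW n - 1).toNat) ≤ n := by
  by_contra hc
  push_neg at hc
  have h1 : (1:Int) ≤ digitsW n := by
    have := pow_le_digitsW 0 n (by simpa using h)
    simpa using this
  have := digitsW_lt_pow ((digitsW n - 1).toNat) n (by omega) hc
  omega

lemma digitsBAux_eq_digitsW : ∀ (f : Nat) (n : Int), n < 10 ^ f → digitsBAux f n = digitsW n := by
  intro f
  induction f with
  | zero =>
    intro n h
    simp only [pow_zero] at h
    rw [digitsW_of_nonpos (by omega)]
    rfl
  | succ f ih =>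
    intro n h
    by_cases hn : 0 < n
    · have hfd : PySem.Int.floordiv n 10 = n / 10 :=
        PySem.Int.floordiv_eq_ediv_of_pos (by omega)
      rw [digitsW_of_pos hn]
      simp only [digitsBAux, if_pos hn, hfd]
      rw [ih (n / 10) (by rw [pow_succ] at h; omega)]
    · rw [digitsW_of_nonpos hn]
      simp [digitsBAux, hn]

lemma digitsB_eq_digitsW {n : Int} (h : n ≤ 1000000000) : digitsB n = digitsW n :=
  digitsBAux_eq_digitsW 64 n (by calc n ≤ 1000000000 := h
                                   _ < 10 ^ 64 := by norm_num)

-- binary-search loop invariant: with the feasible set exactly [1, M], the loop returns M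
lemma solveLoopB_inv {A B X M : Int} (hM1 : 1 ≤ M)
    (hfeas : ∀ n : Int, 1 ≤ n → n ≤ M → A * n + B * digitsB n ≤ X)
    (hinfeas : ∀ n : Int, M < n → n ≤ 1000000000 → ¬ (A * n + B * digitsB n ≤ X)) :
    ∀ (f : Nat) (lo hi ans : Int),
      hi - lo + 1 ≤ 2 ^ f - 1 → 1 ≤ lo → lo ≤ M + 1 → M ≤ hi → hi ≤ 1000000000 →
      (ans = lo - 1 ∨ (ans = 1 ∧ lo = 1)) →
      solveLoopB A B X f lo hi ans = M := by
  intro f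
  induction f with
  | zero =>
    intro lo hi ans hsz h1 h2 h3 h4 h5
    simp only [pow_zero] at hsz
    simp only [solveLoopB]
    omega
  | succ f ih =>
    intro lo hi ans hsz h1 h2 h3 h4 h5
    by_cases hlh : lo ≤ hi
    · have hmid := PySem.Int.floordiv_two_mid_bounds hlh
      set mid := PySem.Int.floordiv (lo + hi) 2 with hmiddef
      have hmide : mid = (lo + hi) / 2 := by
        rw [hmiddef, PySem.Int.floordiv_eq_ediv_of_pos (by omega : (0:Int) < 2)]
      have hpow : (2:Int) ^ (f + 1) = 2 * 2 ^ f := by ring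
      have hunf : solveLoopB A B X (f + 1) lo hi ans =
          if A * mid + B * digitsB mid ≤ X then solveLoopB A B X f (mid + 1) hi mid
          else solveLoopB A B X f lo (mid - 1) ans := by
        simp only [solveLoopB, if_pos hlh]
        rw [← hmiddef]
      by_cases hcf : A * mid + B * digitsB mid ≤ X
      · have hmle : mid ≤ M := by
          by_contra hgt
          exact hinfeas mid (by omega) (by omega) hcf
        rw [hunf, if_pos hcf]
        exact ih (mid + 1) hi mid (by rw [hpow] at hsz; omega) (by omega) (by omega)
          h3 h4 (by omega)
      · have hgt : M ≤ mid - 1 := by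
          by_contra hle
          exact hcf (hfeas mid (by omega) (by omega))
        rw [hunf, if_neg hcf]
        exact ih lo (mid - 1) ans (by rw [hpow] at hsz; omega) h1 h2 hgt (by omega) h5
    · simp only [solveLoopB, if_neg hlh]
      omega

-- ===== VERDICT (by name: the statement is the Claim_ definition above) =====
theorem solve_spec : Claim_equal_solve := by
  unfold Claim_equal_solve
  intro A B X hDom hPre
  unfold Spec_solve
  by_cases hg : A + B > X
  · simp [solve, solve_alt, hg]
  · -- main branch: Pre_ gives 1 ≤ A and 0 ≤ B
    have hA : 1 ≤ A := by
      rcases hPre with h | h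
      · omega
      · exact h.1
    have hB : 0 ≤ B := by
      rcases hPre with h | h
      · omega
      · exact h.2
    have hAB : A + B ≤ X := by omega
    have hX : X ≤ 2147483648 := by
      unfold Dom_solve pvDomInt at hDom
      simp only [Bool.and_eq_true, decide_eq_true_eq] at hDom
      exact hDom.2.2
    -- characterize A's loop result r
    set r := solveLoopA A B X 100 1 with hrdef
    have hC1 : CondA A B X 1 := by unfold CondA; simpa using hAB
    have hNC11 : ¬ CondA A B X 11 := by
      unfold CondA
      intro hc
      have he : (((11:Int) - 1).toNat) = 10 := rfl
      rw [he] at hc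
      norm_num at hc
      nlinarith
    have hspec := solveLoopA_spec 100 1 (by omega) hC1
      ⟨11, by omega, by norm_num, hNC11⟩
    rw [← hrdef] at hspec
    obtain ⟨hCr, hNCr, hr1⟩ := hspec
    -- r ≤ 10
    have hr10 : r ≤ 10 := by
      by_contra hgt
      push_neg at hgt
      unfold CondA at hCr
      have he : 10 ≤ (r - 1).toNat := by omega
      have hp : (10:Int) ^ 10 ≤ 10 ^ ((r - 1).toNat) :=
        pow_le_pow_right₀ (by norm_num) he
      nlinarith
    have hre : r.toNat = (r - 1).toNat + 1 := by omega
    -- the three components of A's min, and M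
    set c1 : Int := 10 ^ r.toNat - 1 with hc1def
    set c2 : Int := PySem.Int.floordiv (X - B * r) A with hc2def
    set M : Int := min c1 (min c2 1000000000) with hMdef
    have hApos : (0:Int) < A := by omega
    have hc2low : 10 ^ ((r - 1).toNat) ≤ c2 := by
      rw [hc2def, PySem.Int.le_floordiv_iff_mul_le hApos]
      unfold CondA at hCr
      nlinarith
    have hplow : (1:Int) ≤ 10 ^ ((r - 1).toNat) := one_le_pow₀ (by norm_num)
    have hc1low : 10 ^ ((r - 1).toNat) ≤ c1 := by
      rw [hc1def, hre, pow_succ]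
      nlinarith
    have h9low : 10 ^ ((r - 1).toNat) ≤ (1000000000 : Int) := by
      calc (10:Int) ^ ((r - 1).toNat) ≤ 10 ^ 9 :=
            pow_le_pow_right₀ (by norm_num) (by omega)
        _ ≤ 1000000000 := by norm_num
    have hMlow : 10 ^ ((r - 1).toNat) ≤ M := le_min hc1low (le_min hc2low h9low)
    have hM1 : 1 ≤ M := le_trans hplow hMlow
    have hM9 : M ≤ 1000000000 := le_trans (min_le_right _ _) (min_le_right _ _)
    have hMc2 : M ≤ c2 := le_trans (min_le_right _ _) (min_le_left _ _)
    have hMc1 : M ≤ c1 := min_le_left _ _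
    -- c2 * A ≤ X - B*r  (floor division)
    have hc2mul : c2 * A ≤ X - B * r := by
      rw [hc2def]
      exact (PySem.Int.le_floordiv_iff_mul_le hApos).mp le_rfl
    -- M is feasible
    have hdM : digitsW M ≤ r := by
      have : M < 10 ^ r.toNat := by omega
      have := digitsW_lt_pow r.toNat M (by omega) this
      omega
    have hMfeas : A * M + B * digitsW M ≤ X := by
      have h1 : A * M ≤ c2 * A := by nlinarith
      have h2 : B * digitsW M ≤ B * r := by nlinarith
      linarith
    -- everything in [1, M] is feasible
    have hfeas : ∀ n : Int, 1 ≤ n → n ≤ M → A * n + B * digitsB n ≤ X := by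
      intro n hn1 hnM
      rw [digitsB_eq_digitsW (by omega)]
      have hd : digitsW n ≤ digitsW M := digitsW_mono M n (by omega) hnM
      nlinarith
    -- everything in (M, 10^9] is infeasible
    have hinfeas : ∀ n : Int, M < n → n ≤ 1000000000 → ¬ (A * n + B * digitsB n ≤ X) := by
      intro n hMn hn9 hc
      rw [digitsB_eq_digitsW (by omega)] at hc
      by_cases hbig : 10 ^ r.toNat ≤ n
      · -- n has more than r digits: the failed loop condition propagates
        have hd : r + 1 ≤ digitsW n := by
          have := pow_le_digitsW r.toNat n hbig
          omega
        have hNCd := condA_fail_propagate hA hB (r + 1) (by omega) hNCr (digitsW n) hd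
        unfold CondA at hNCd
        have hnlow : 10 ^ ((digitsW n - 1).toNat) ≤ n := digitsW_lower (by omega)
        nlinarith
      · -- n has at most r digits, so n exceeds the division bound c2
        push_neg at hbig
        have hnc1 : n ≤ c1 := by omega
        have hc2lt : c2 < n := by omega
        have hmul : X - B * r < n * A := by
          rw [hc2def] at hc2lt
          exact (PySem.Int.floordiv_lt_iff_lt_mul hApos).mp hc2lt
        have hd : r ≤ digitsW n := by
          have hge : 10 ^ ((r - 1).toNat) ≤ n := by omega
          have := pow_le_digitsW ((r - 1).toNat) n hge
          omega
        nlinarith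
    -- solve A B X = M
    have hAside : solve A B X = M := by
      simp only [solve, if_neg hg]
      rw [← hrdef, ← hc1def, ← hc2def, ← hMdef]
    -- solve_alt A B X = M
    have hBside : solve_alt A B X = M := by
      simp only [solve_alt, if_neg hg]
      exact solveLoopB_inv hM1 hfeas hinfeas 64 1 1000000000 1
        (by norm_num) (by omega) (by omega) hM9 le_rfl (by omega)
    rw [hAside, hBside]
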